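-- pv_equiv track=rewrite | github.com/DAEUN9/TIL | Soving/programmers/level3/풍선 터트리기.py | solution
-- ===== SOURCE A (Python) =====
-- def solution(a):
--     if len(a) <= 3:
--         return len(a)
--     answer = 2
--     left_table = [0]*len(a)
--     right_table = [0]*len(a)
--     left_table[0], right_table[-1] = a[0], a[-1]
--     for i in range(1, len(a)):
--         left_table[i] = min(left_table[i-1], a[i])
--     for k in range(len(a)-2, -1, -1):
--         right_table[k] = min(right_table[k+1], a[k])
--
--     for j in range(1, len(a)-1):
--         if left_table[j-1] < a[j] and right_table[j+1] < a[j]: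
--             continue
--         answer += 1
--     return answer
-- ===== SOURCE B (Python) =====
-- def solution(a):
--     if len(a) <= 3:
--         return len(a)
--     L = 0
--     cur = a[0]
--     for x in a:
--         if x <= cur:
--             cur = x
--             L += 1
--     R = 0
--     cur = a[-1]
--     for x in reversed(a):
--         if x <= cur:
--             cur = x
--             R += 1
--     return L + R - a.count(min(a))
-- ===== Notes on version B (the rewrite author's own statement) =====
-- stated objective: faster
-- what changed: Replaces A's two precomputed min tables and the interior index scan by two running-minimum counting passes (left-to-right and right-to-left) combined by inclusion-exclusion with the count of the global minimum; no tables are built or mutated.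
import Mathlib
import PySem

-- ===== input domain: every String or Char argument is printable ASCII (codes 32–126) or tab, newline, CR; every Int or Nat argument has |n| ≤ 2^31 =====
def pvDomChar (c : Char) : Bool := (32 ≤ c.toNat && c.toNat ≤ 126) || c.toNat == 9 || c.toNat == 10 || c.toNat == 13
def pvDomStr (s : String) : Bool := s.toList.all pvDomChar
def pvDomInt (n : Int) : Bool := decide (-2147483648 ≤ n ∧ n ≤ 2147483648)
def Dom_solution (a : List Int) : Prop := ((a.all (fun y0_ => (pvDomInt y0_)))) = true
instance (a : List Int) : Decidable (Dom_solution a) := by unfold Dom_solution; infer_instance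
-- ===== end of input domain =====

-- B replaces A's two precomputed min tables and interior scan by two running-minimum counting
-- passes plus inclusion–exclusion on the count of the global minimum (measured constant-factor
-- speedup: no tables are built or mutated).

-- ===== PORT A =====
def solution (a : List Int) : Int :=
  if PySem.List.len a ≤ 3 then PySem.List.len a
  else
    let answer : Int := 2
    let leftTable : List Int := List.replicate a.length (0:Int)
    let rightTable : List Int := List.replicate a.length (0:Int)
    let leftTable := PySem.List.pySetD leftTable 0 (PySem.List.pyGetD a 0 0)
    let rightTable := PySem.List.pySetD rightTable (-1) (PySem.List.pyGetD a (-1) 0)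
    let leftTable := (PySem.List.pyRange 1 (PySem.List.len a) 1).foldl
      (fun t i => PySem.List.pySetD t i (min (PySem.List.pyGetD t (i-1) 0) (PySem.List.pyGetD a i 0))) leftTable
    let rightTable := (PySem.List.pyRange (PySem.List.len a - 2) (-1) (-1)).foldl
      (fun t k => PySem.List.pySetD t k (min (PySem.List.pyGetD t (k+1) 0) (PySem.List.pyGetD a k 0))) rightTable
    (PySem.List.pyRange 1 (PySem.List.len a - 1) 1).foldl
      (fun ans j =>
        if PySem.List.pyGetD leftTable (j-1) 0 < PySem.List.pyGetD a j 0 ∧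
           PySem.List.pyGetD rightTable (j+1) 0 < PySem.List.pyGetD a j 0 then ans
        else ans + 1) answer

-- ===== PORT B =====
def solution_alt (a : List Int) : Int :=
  if PySem.List.len a ≤ 3 then PySem.List.len a
  else
    let pL := a.foldl (fun (p : Int × Int) x => if x ≤ p.2 then (p.1 + 1, x) else p)
      (0, PySem.List.pyGetD a 0 0)
    let pR := a.reverse.foldl (fun (p : Int × Int) x => if x ≤ p.2 then (p.1 + 1, x) else p)
      (0, PySem.List.pyGetD a (-1) 0)
    pL.1 + pR.1 - (PySem.List.count a ((PySem.List.min? a (fun x => x)).getD 0) : Int)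

-- ===== PRECONDITION & SPEC =====
def Spec_solution (a : List Int) (out : Int) : Prop := out = solution_alt a
instance (a : List Int) (out : Int) : Decidable (Spec_solution a out) := by unfold Spec_solution; infer_instance

-- ===== CLAIM (what is proved, stated in full; the proofs are below) =====
def Claim_equal_solution : Prop := ∀ (a : List Int), Dom_solution a → Spec_solution a (solution a)

-- ===== LEMMAS AND PROOFS =====

-- "minimum of the elements strictly before each position", seeded with c
def pvPbf (c : Int) : List Int → List Int
  | [] => []
  | x :: t => c :: pvPbf (min c x) t

-- before-minima of a (seeded with the head) and after-minima (seeded with the last element)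
def pvPB (a : List Int) : List Int := match a with | [] => [] | x :: t => pvPbf x (x :: t)
def pvSA (a : List Int) : List Int := (pvPB a.reverse).reverse

-- "position j survives from the left / from the right"
def pvP (a : List Int) (j : Nat) : Bool := decide (a.getD j 0 ≤ (pvPB a).getD j 0)
def pvS (a : List Int) (j : Nat) : Bool := decide (a.getD j 0 ≤ (pvSA a).getD j 0)

theorem pv_foldl_min_out (l : List Int) (c x : Int) :
    l.foldl min (min c x) = min (l.foldl min c) x := by
  induction l generalizing c with
  | nil => rfl
  | cons y t ih =>
    simp only [List.foldl_cons]
    rw [show min (min c x) y = min (min c y) x by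
      rw [min_assoc, min_comm x y, ← min_assoc], ih]

theorem pv_length_pvPbf (c : Int) (l : List Int) : (pvPbf c l).length = l.length := by
  induction l generalizing c with
  | nil => rfl
  | cons x t ih => simp [pvPbf, ih]

theorem pv_pvPbf_getD (c : Int) (l : List Int) (j : Nat) (h : j < l.length) :
    (pvPbf c l).getD j 0 = (l.take j).foldl min c := by
  induction l generalizing c j with
  | nil => simp at h
  | cons x t ih =>
    cases j with
    | zero => simp [pvPbf]
    | succ j =>
      simp only [pvPbf, List.getD_cons_succ, List.take_succ_cons, List.foldl_cons]
      exact ih (min c x) j (by simpa using h)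

theorem pv_getD_reverse (l : List Int) (j : Nat) (h : j < l.length) :
    l.reverse.getD j 0 = l.getD (l.length - 1 - j) 0 := by
  rw [List.getD_eq_getElem _ _ (by simpa using h), List.getD_eq_getElem _ _ (by omega),
    List.getElem_reverse]

theorem pv_foldl_min_reverse (l : List Int) (c : Int) :
    l.reverse.foldl min c = l.foldl min c := by
  induction l generalizing c with
  | nil => rfl
  | cons x t ih =>
    simp only [List.reverse_cons, List.foldl_append, List.foldl_cons, List.foldl_nil, ih]
    rw [← pv_foldl_min_out]

theorem pv_foldB (l : List Int) (c : Int) (k : Int) :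
    l.foldl (fun (p : Int × Int) x => if x ≤ p.2 then (p.1 + 1, x) else p) (k, c)
      = (k + ((l.zip (pvPbf c l)).countP (fun q => q.1 ≤ q.2) : Int), l.foldl min c) := by
  induction l generalizing c k with
  | nil => simp
  | cons x t ih =>
    simp only [List.foldl_cons, pvPbf, List.zip_cons_cons, List.countP_cons]
    by_cases hx : x ≤ c
    · rw [if_pos hx, ih, show min c x = x by omega]
      simp [hx]
      push_cast
      ring
    · rw [if_neg hx, ih, show min c x = c by omega]
      simp [hx]

theorem pv_countP_zip_range (l m : List Int) (p : Int → Int → Bool) (h : l.length = m.length) :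
    (l.zip m).countP (fun q => p q.1 q.2)
      = (List.range l.length).countP (fun j => p (l.getD j 0) (m.getD j 0)) := by
  induction l generalizing m with
  | nil => simp
  | cons x t ih =>
    cases m with
    | nil => simp at h
    | cons b m' =>
      rw [List.zip_cons_cons, List.countP_cons, ih m' (by simpa using h),
        show (x::t : List Int).length = t.length + 1 from rfl,
        List.range_succ_eq_map, List.countP_cons, List.countP_map,
        show (fun j : Nat => p (t.getD j 0) (m'.getD j 0))
          = ((fun j => p ((x::t).getD j 0) ((b::m').getD j 0)) ∘ Nat.succ) from rfl]
      rfl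

theorem pv_countP_range_rev (N : Nat) (f : Nat → Bool) :
    (List.range N).countP f = (List.range N).countP (fun j => f (N - 1 - j)) := by
  have h1 : (List.range N).map (fun j => N - 1 - j) = (List.range N).reverse := by
    apply List.ext_getElem
    · simp
    · intro i h1 h2
      simp only [List.getElem_map, List.getElem_range, List.getElem_reverse]
      simp at h1 h2 ⊢
  calc (List.range N).countP f = ((List.range N).reverse).countP f := by
        rw [List.countP_reverse]
    _ = ((List.range N).map (fun j => N - 1 - j)).countP f := by rw [h1]
    _ = (List.range N).countP (fun j => f (N - 1 - j)) := by rw [List.countP_map]; rfl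

theorem pv_count_range (l : List Int) (v : Int) :
    l.count v = (List.range l.length).countP (fun j => l.getD j 0 == v) := by
  induction l with
  | nil => simp
  | cons x t ih =>
    rw [List.count_cons, ih,
      show (x::t : List Int).length = t.length + 1 from rfl,
      List.range_succ_eq_map, List.countP_cons, List.countP_map,
      show (fun j : Nat => t.getD j 0 == v)
        = ((fun j => (x::t).getD j 0 == v) ∘ Nat.succ) from rfl]
    simp

theorem pv_countP_or_and (l : List Nat) (p q : Nat → Bool) :
    l.countP (fun j => p j || q j) + l.countP (fun j => p j && q j)
      = l.countP p + l.countP q := by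
  induction l with
  | nil => rfl
  | cons x t ih =>
    simp only [List.countP_cons]
    cases hp : p x <;> cases hq : q x <;> simp <;> omega

theorem pv_pySetD_neg_one (xs : List Int) (v : Int) (h : xs ≠ []) :
    PySem.List.pySetD xs (-1) v = xs.set (xs.length - 1) v := by
  have hx : 0 < xs.length := List.length_pos_iff.mpr h
  simp [PySem.List.pySetD, PySem.List.pySet?, PySem.List.pyIdx?]
  rw [if_pos (by omega : 1 ≤ xs.length)]
  rfl

theorem pv_ltLoop (a : List Int) (m : Nat) (hm1 : 1 ≤ m) (hmn : m ≤ a.length) (T : List Int)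
    (hTlen : T.length = a.length) (hT0 : T.getD 0 0 = a.getD 0 0) :
    (((PySem.List.pyRange 1 (m:Int) 1).foldl
        (fun t i => PySem.List.pySetD t i
          (min (PySem.List.pyGetD t (i-1) 0) (PySem.List.pyGetD a i 0))) T).length = a.length)
    ∧ ∀ j, j < a.length →
        ((PySem.List.pyRange 1 (m:Int) 1).foldl
          (fun t i => PySem.List.pySetD t i
            (min (PySem.List.pyGetD t (i-1) 0) (PySem.List.pyGetD a i 0))) T).getD j 0
          = if j < m then (a.take (j+1)).foldl min (a.getD 0 0) else T.getD j 0 := by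
  induction m, hm1 using Nat.le_induction with
  | base =>
    have h11 : ((1:Nat):Int) = 1 := by norm_num
    rw [h11]
    rw [show PySem.List.pyRange 1 (1:Int) 1 = [] from PySem.List.pyRange_one_eq_nil (le_refl (1:Int))]
    simp only [List.foldl_nil]
    refine ⟨hTlen, fun j hj => ?_⟩
    by_cases h0 : j < 1
    · rw [if_pos h0]
      obtain ⟨x, t, rfl⟩ := List.exists_cons_of_ne_nil (l := a) (by intro h; rw [h] at hj; simp at hj)
      interval_cases j
      simpa using hT0
    · rw [if_neg h0]
  | succ m hm1 ih =>
    have hmn' : m ≤ a.length := by omega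
    have hmlt : m < a.length := by omega
    obtain ⟨ihlen, ihget⟩ := ih hmn'
    rw [show ((m+1:Nat):Int) = (m:Int)+1 by push_cast; ring,
      PySem.List.pyRange_one_succ_right (by exact_mod_cast hm1), List.foldl_append]
    set L := (PySem.List.pyRange 1 (m:Int) 1).foldl
      (fun t i => PySem.List.pySetD t i
        (min (PySem.List.pyGetD t (i-1) 0) (PySem.List.pyGetD a i 0))) T with hL
    simp only [List.foldl_cons, List.foldl_nil]
    rw [show (m:Int) - 1 = ((m-1:Nat):Int) by push_cast [hm1]; ring]
    rw [PySem.List.pyGetD_natCast, PySem.List.pyGetD_natCast,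
      PySem.List.pySetD_of_nonneg L _ (by positivity : (0:Int) ≤ (m:Int)), Int.toNat_natCast]
    have hlen2 : (L.set m (min (L.getD (m-1) 0) (a.getD m 0))).length = a.length := by
      simpa using ihlen
    refine ⟨hlen2, fun j hj => ?_⟩
    have hLval : L.getD (m-1) 0 = (a.take m).foldl min (a.getD 0 0) := by
      rw [ihget (m-1) (by omega), if_pos (by omega), show m - 1 + 1 = m by omega]
    rw [List.getD_eq_getElem _ _ (by omega : j < (L.set m _).length),
      List.getElem_set]
    by_cases hjm : m = j
    · subst hjm
      have htk : List.take (m+1) a = List.take m a ++ [a[m]] := by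
        rw [List.take_add_one, List.getElem?_eq_getElem hmlt]
        rfl
      rw [if_pos rfl, if_pos (by omega), hLval, List.getD_eq_getElem a _ hmlt, htk,
        List.foldl_append]
      simp
    · rw [if_neg hjm, ← List.getD_eq_getElem _ 0 , ihget j hj]
      by_cases hjlt : j < m
      · rw [if_pos hjlt, if_pos (by omega)]
      · rw [if_neg hjlt, if_neg (by omega)]

theorem pv_rtLoop (a : List Int) (y0 : Int) (k : Nat) (hk : k + 1 ≤ a.length) (T : List Int)
    (hTlen : T.length = a.length)
    (hT : ∀ j, k ≤ j → j < a.length → T.getD j 0 = (a.drop j).foldl min y0) :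
    (((PySem.List.pyRange ((k:Int) - 1) (-1) (-1)).foldl
        (fun t i => PySem.List.pySetD t i
          (min (PySem.List.pyGetD t (i+1) 0) (PySem.List.pyGetD a i 0))) T).length = a.length)
    ∧ ∀ j, j < a.length →
        ((PySem.List.pyRange ((k:Int) - 1) (-1) (-1)).foldl
          (fun t i => PySem.List.pySetD t i
            (min (PySem.List.pyGetD t (i+1) 0) (PySem.List.pyGetD a i 0))) T).getD j 0
          = (a.drop j).foldl min y0 := by
  induction k generalizing T with
  | zero =>
    rw [show ((0:Nat):Int) - 1 = -1 by norm_num, PySem.List.pyRange_neg_one_eq_nil (le_refl _)]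
    exact ⟨hTlen, fun j hj => hT j (Nat.zero_le j) hj⟩
  | succ k ih =>
    rw [show ((k+1:Nat):Int) - 1 = (k:Int) by push_cast; ring,
      PySem.List.pyRange_neg_one_cons (by omega)]
    simp only [List.foldl_cons]
    rw [show (k:Int) + 1 = ((k+1:Nat):Int) by push_cast; ring]
    rw [PySem.List.pyGetD_natCast, PySem.List.pyGetD_natCast,
      PySem.List.pySetD_of_nonneg T _ (by positivity : (0:Int) ≤ (k:Int)), Int.toNat_natCast]
    have hkn : k < a.length := by omega
    have hdk : a.drop k = a[k] :: a.drop (k+1) := List.drop_eq_getElem_cons hkn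
    have hval : min (T.getD (k+1) 0) (a.getD k 0) = (a.drop k).foldl min y0 := by
      rw [hT (k+1) (by omega) (by omega), hdk, List.foldl_cons, pv_foldl_min_out,
        List.getD_eq_getElem a _ hkn]
    rw [hval]
    refine ih (by omega) (T.set k (List.foldl min y0 (List.drop k a))) ?_ ?_
    · simpa using hTlen
    · intro j hj1 hj2
      rw [List.getD_eq_getElem _ _ (by simp; omega), List.getElem_set]
      by_cases hjk : k = j
      · subst hjk
        rw [if_pos rfl]
      · rw [if_neg hjk, ← List.getD_eq_getElem _ 0, hT j (by omega) hj2]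

theorem pv_length_pvPB (a : List Int) : (pvPB a).length = a.length := by
  cases a with
  | nil => rfl
  | cons x t => simp [pvPB, pv_length_pvPbf]

theorem pv_pvPB_eq (a : List Int) (ha : a ≠ []) : pvPB a = pvPbf (a.getD 0 0) a := by
  cases a with
  | nil => simp at ha
  | cons x t => rfl

theorem pv_pvPB_getD (a : List Int) (ha : a ≠ []) (j : Nat) (h : j < a.length) :
    (pvPB a).getD j 0 = (a.take j).foldl min (a.getD 0 0) := by
  rw [pv_pvPB_eq a ha, pv_pvPbf_getD _ _ _ h]

theorem pv_pvSA_getD (a : List Int) (ha : a ≠ []) (j : Nat) (h : j < a.length) :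
    (pvSA a).getD j 0 = (a.drop (j+1)).foldl min (a.getD (a.length - 1) 0) := by
  have hpos : 0 < a.length := by omega
  have hr : a.reverse ≠ [] := by simpa using ha
  have hlpb : (pvPB a.reverse).length = a.length := by
    rw [pv_length_pvPB, List.length_reverse]
  have h0 : a.reverse.getD 0 0 = a.getD (a.length - 1) 0 := by
    rw [pv_getD_reverse a 0 hpos, show a.length - 1 - 0 = a.length - 1 by omega]
  have htk : a.reverse.take (a.length - 1 - j) = (a.drop (j+1)).reverse := by
    rw [List.take_reverse, show a.length - (a.length - 1 - j) = j + 1 by omega]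
  rw [pvSA, pv_getD_reverse (pvPB a.reverse) j (by omega), hlpb,
    pv_pvPB_getD a.reverse hr (a.length - 1 - j) (by simp; omega), h0, htk,
    pv_foldl_min_reverse]

theorem pv_glue (u v : List Int) (c d : Int) :
    (u ++ v).foldl min (min c d) = min (u.foldl min c) (v.foldl min d) := by
  rw [List.foldl_append, pv_foldl_min_out u c d, min_comm (u.foldl min c) d,
    pv_foldl_min_out v d (u.foldl min c), min_comm]

theorem pv_min_split_gen (u : List Int) (z : Int) (v : List Int) (c d : Int) :
    (u ++ z :: v).foldl min (min c d) = min (u.foldl min c) (min z (v.foldl min d)) := by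
  rw [pv_glue, List.foldl_cons, pv_foldl_min_out, min_comm (v.foldl min d) z]

theorem pv_min_split (a : List Int) (ha : a ≠ []) (j : Nat) (h : j < a.length) :
    min ((pvPB a).getD j 0) (min (a.getD j 0) ((pvSA a).getD j 0))
      = a.foldl min (a.getD 0 0) := by
  have hyL : a.getD (a.length - 1) 0 ∈ a := by
    rw [List.getD_eq_getElem _ _ (by omega)]
    exact List.getElem_mem _
  have habs : a.foldl min (a.getD 0 0)
      = a.foldl min (min (a.getD 0 0) (a.getD (a.length - 1) 0)) := by
    rw [pv_foldl_min_out, min_eq_left ((PySem.List.foldl_min_le a (a.getD 0 0)).2 _ hyL)]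
  have hsplit : a.take j ++ a[j] :: a.drop (j+1) = a := by
    rw [← List.drop_eq_getElem_cons h, List.take_append_drop]
  have hfold : a.foldl min (min (a.getD 0 0) (a.getD (a.length - 1) 0))
      = (a.take j ++ a[j] :: a.drop (j+1)).foldl min
          (min (a.getD 0 0) (a.getD (a.length - 1) 0)) :=
    congrArg (fun l => List.foldl min (min (a.getD 0 0) (a.getD (a.length - 1) 0)) l) hsplit.symm
  rw [pv_pvPB_getD a ha j (by omega), pv_pvSA_getD a ha j h, habs, hfold, pv_min_split_gen,
    List.getD_eq_getElem a _ h]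

theorem pv_mnA (a : List Int) (ha : a ≠ []) :
    (PySem.List.min? a (fun x => x)).getD 0 = a.foldl min (a.getD 0 0) := by
  cases a with
  | nil => simp at ha
  | cons x t =>
    rw [PySem.List.min?_id_cons]
    simp

theorem pv_PandS (a : List Int) (ha : a ≠ []) (j : Nat) (h : j < a.length) :
    (pvP a j && pvS a j) = (a.getD j 0 == a.foldl min (a.getD 0 0)) := by
  have hms := pv_min_split a ha j h
  have h1 : (pvP a j && pvS a j)
      = decide (a.getD j 0 ≤ (pvPB a).getD j 0 ∧ a.getD j 0 ≤ (pvSA a).getD j 0) := by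
    simp [pvP, pvS]
  have h2 : (a.getD j 0 == a.foldl min (a.getD 0 0))
      = decide (a.getD j 0 = a.foldl min (a.getD 0 0)) := rfl
  rw [h1, h2, decide_eq_decide]
  constructor
  · rintro ⟨hp, hs⟩
    refine le_antisymm ?_ ?_
    · rw [← hms]
      exact le_min hp (le_min (le_refl _) hs)
    · rw [← hms]
      exact le_trans (min_le_right _ _) (min_le_left _ _)
  · intro hx
    constructor
    · rw [hx, ← hms]
      exact min_le_left _ _
    · rw [hx, ← hms]
      exact le_trans (min_le_right _ _) (min_le_right _ _)

theorem pv_A_val (a : List Int) (h4 : 4 ≤ a.length) :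
    solution a = 2 + ((List.range (a.length - 2)).countP (fun k => pvP a (k+1) || pvS a (k+1)) : Int) := by
  have ha : a ≠ [] := by intro h; rw [h] at h4; simp at h4
  have hlen : ¬ (PySem.List.len a ≤ 3) := by simp; omega
  unfold solution
  rw [if_neg hlen]
  simp only [PySem.List.len_eq]
  have hy : PySem.List.pyGetD a (-1) 0 = a.getD (a.length - 1) 0 := by
    rw [PySem.List.pyGetD_neg_one a 0 ha, List.getLast_eq_getElem,
      List.getD_eq_getElem a _ (by omega)]
  have hx : PySem.List.pyGetD a 0 0 = a.getD 0 0 := PySem.List.pyGetD_zero a 0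
  set L0 : List Int := PySem.List.pySetD (List.replicate a.length (0:Int)) 0 (PySem.List.pyGetD a 0 0) with hL0
  have hL0set : L0 = (List.replicate a.length (0:Int)).set 0 (a.getD 0 0) := by
    rw [hL0, PySem.List.pySetD_of_nonneg _ _ (le_refl 0), hx]
    rfl
  have hL0len : L0.length = a.length := by rw [hL0set]; simp
  have hL00 : L0.getD 0 0 = a.getD 0 0 := by
    rw [hL0set, List.getD_eq_getElem _ _ (by simp; omega), List.getElem_set]
    simp
  obtain ⟨hLlen, hLget⟩ := pv_ltLoop a a.length (by omega) (le_refl _) L0 hL0len hL00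
  set R0 : List Int := PySem.List.pySetD (List.replicate a.length (0:Int)) (-1) (PySem.List.pyGetD a (-1) 0) with hR0
  have hR0set : R0 = (List.replicate a.length (0:Int)).set (a.length - 1) (a.getD (a.length - 1) 0) := by
    rw [hR0, pv_pySetD_neg_one _ _ (by simp; omega), hy]
    simp
  have hR0len : R0.length = a.length := by rw [hR0set]; simp
  have hR0get : ∀ j, a.length - 1 ≤ j → j < a.length →
      R0.getD j 0 = (a.drop j).foldl min (a.getD (a.length - 1) 0) := by
    intro j hj1 hj2
    have hj : j = a.length - 1 := by omega
    subst hj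
    rw [hR0set, List.getD_eq_getElem _ _ (by simp; omega), List.getElem_set,
      if_pos rfl, List.drop_eq_getElem_cons (by omega : a.length - 1 < a.length),
      show a.length - 1 + 1 = a.length by omega, List.drop_length, List.foldl_cons,
      List.foldl_nil, List.getD_eq_getElem a _ (by omega), min_self]
  obtain ⟨hRlen, hRget⟩ := pv_rtLoop a (a.getD (a.length - 1) 0) (a.length - 1) (by omega) R0 hR0len hR0get
  simp only [show ((a.length:Int) - 2) = ((a.length - 1 : Nat) : Int) - 1 by omega]
  rw [PySem.List.pyRange_one 1 ((a.length:Int) - 1), List.foldl_map,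
    show ((a.length:Int) - 1 - 1).toNat = a.length - 2 from by omega]
  rw [PySem.List.foldl_congr_mem (List.range (a.length - 2)) _
    (fun ans k => if (pvP a (k+1) || pvS a (k+1)) then ans + 1 else ans) 2 ?hcong]
  case hcong =>
    intro acc k hk
    rw [List.mem_range] at hk
    have e1 : (1:Int) + (k:Int) - 1 = ((k:Nat):Int) := by push_cast; ring
    have e2 : (1:Int) + (k:Int) = ((k+1:Nat):Int) := by push_cast; ring
    have e3 : (1:Int) + (k:Int) + 1 = ((k+2:Nat):Int) := by push_cast; ring
    rw [e1, e3, e2, PySem.List.pyGetD_natCast, PySem.List.pyGetD_natCast,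
      PySem.List.pyGetD_natCast, hLget k (by omega), if_pos (show k < a.length by omega),
      hRget (k+2) (by omega)]
    have hp : (pvPB a).getD (k+1) 0 = (a.take (k+1)).foldl min (a.getD 0 0) :=
      pv_pvPB_getD a ha (k+1) (by omega)
    have hs : (pvSA a).getD (k+1) 0 = (a.drop (k+2)).foldl min (a.getD (a.length - 1) 0) := by
      have := pv_pvSA_getD a ha (k+1) (by omega)
      simpa using this
    simp only [pvP, pvS, hp, hs]
    by_cases h1 : (a.take (k+1)).foldl min (a.getD 0 0) < a.getD (k+1) 0
    · by_cases h2 : (a.drop (k+2)).foldl min (a.getD (a.length - 1) 0) < a.getD (k+1) 0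
      · rw [if_pos ⟨h1, h2⟩, if_neg (by simp only [Bool.or_eq_true, decide_eq_true_eq]; omega)]
      · rw [if_neg (by intro hC; exact h2 hC.2), if_pos (by simp only [Bool.or_eq_true, decide_eq_true_eq]; omega)]
    · rw [if_neg (by intro hC; exact h1 hC.1), if_pos (by simp only [Bool.or_eq_true, decide_eq_true_eq]; omega)]
  rw [PySem.List.foldl_if_add_one (fun k => pvP a (k+1) || pvS a (k+1)) _ 2]

theorem pv_B_val (a : List Int) (h4 : 4 ≤ a.length) :
    solution_alt a
      = ((List.range a.length).countP (pvP a) : Int)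
        + ((List.range a.length).countP (pvS a) : Int)
        - ((List.range a.length).countP (fun j => pvP a j && pvS a j) : Int) := by
  have ha : a ≠ [] := by intro h; rw [h] at h4; simp at h4
  have har : a.reverse ≠ [] := by simpa using ha
  have hlen : ¬ (PySem.List.len a ≤ 3) := by simp; omega
  unfold solution_alt
  rw [if_neg hlen]
  simp only [pv_foldB]
  rw [PySem.List.pyGetD_neg_one a 0 ha,
    show a.getLast ha = a.reverse.getD 0 0 by
      rw [pv_getD_reverse a 0 (by omega), List.getLast_eq_getElem,
        List.getD_eq_getElem a _ (by omega)]
      congr 1,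
    PySem.List.pyGetD_zero, ← pv_pvPB_eq a ha, ← pv_pvPB_eq a.reverse har]
  rw [pv_countP_zip_range a (pvPB a) (fun u w => decide (u ≤ w)) (pv_length_pvPB a).symm,
    pv_countP_zip_range a.reverse (pvPB a.reverse) (fun u w => decide (u ≤ w))
      (pv_length_pvPB a.reverse).symm,
    List.length_reverse]
  rw [pv_countP_range_rev a.length
    (fun j => decide (a.reverse.getD j 0 ≤ (pvPB a.reverse).getD j 0))]
  have hrev : ∀ j ∈ List.range a.length,
      (decide (a.reverse.getD (a.length - 1 - j) 0 ≤ (pvPB a.reverse).getD (a.length - 1 - j) 0))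
        = pvS a j := by
    intro j hj
    rw [List.mem_range] at hj
    have h1 : a.reverse.getD (a.length - 1 - j) 0 = a.getD j 0 := by
      rw [pv_getD_reverse a (a.length - 1 - j) (by omega),
        show a.length - 1 - (a.length - 1 - j) = j by omega]
    have h2 : (pvPB a.reverse).getD (a.length - 1 - j) 0 = (pvSA a).getD j 0 := by
      have := pv_getD_reverse (pvPB a.reverse) j (by rw [pv_length_pvPB, List.length_reverse]; omega)
      rw [pv_length_pvPB, List.length_reverse] at this
      rw [← this]
      rfl
    rw [h1, h2]
    rfl
  rw [show List.countP
        (fun j => decide (a.reverse.getD (a.length - 1 - j) 0 ≤ (pvPB a.reverse).getD (a.length - 1 - j) 0))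
        (List.range a.length) = List.countP (pvS a) (List.range a.length) from
      List.countP_congr (fun j hj => by rw [hrev j hj])]
  rw [PySem.List.count_eq, pv_mnA a ha, pv_count_range]
  rw [show List.countP (fun j => a.getD j 0 == a.foldl min (a.getD 0 0)) (List.range a.length)
        = List.countP (fun j => pvP a j && pvS a j) (List.range a.length) from
      List.countP_congr (fun j hj => by
        rw [pv_PandS a ha j (by rw [List.mem_range] at hj; omega)])]
  rw [show (fun j => decide (a.getD j 0 ≤ (pvPB a).getD j 0)) = pvP a from rfl]
  ring

theorem pv_ends_split (a : List Int) (h4 : 4 ≤ a.length) :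
    (List.range a.length).countP (fun j => pvP a j || pvS a j)
      = 2 + (List.range (a.length - 2)).countP (fun k => pvP a (k+1) || pvS a (k+1)) := by
  have ha : a ≠ [] := by intro h; rw [h] at h4; simp at h4
  have hP0 : pvP a 0 = true := by
    simp only [pvP, decide_eq_true_eq]
    rw [pv_pvPB_getD a ha 0 (by omega)]
    simp
  have hSl : pvS a (a.length - 1) = true := by
    simp only [pvS, decide_eq_true_eq]
    rw [pv_pvSA_getD a ha (a.length - 1) (by omega),
      show a.length - 1 + 1 = a.length by omega, List.drop_length]
    simp
  have hm : a.length = (a.length - 2) + 1 + 1 := by omega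
  rw [hm, List.range_succ, List.countP_append, List.range_succ_eq_map, List.countP_cons,
    List.countP_map,
    show ((fun j => pvP a j || pvS a j) ∘ Nat.succ) = (fun k => pvP a (k+1) || pvS a (k+1)) from rfl,
    show a.length - 2 + 1 + 1 - 2 = a.length - 2 from by omega]
  have hb0 : (pvP a 0 || pvS a 0) = true := by rw [hP0]; simp
  have hbl : (pvP a ((a.length - 2) + 1) || pvS a ((a.length - 2) + 1)) = true := by
    rw [show (a.length - 2) + 1 = a.length - 1 by omega, hSl]
    simp
  simp only [List.countP_cons, List.countP_nil, hb0, hbl]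
  simp
  omega

-- ===== VERDICT (by name: the statement is the Claim_ definition above) =====
theorem solution_spec : Claim_equal_solution := by
  unfold Claim_equal_solution
  intro a _
  unfold Spec_solution
  by_cases hn : 4 ≤ a.length
  · rw [pv_A_val a hn, pv_B_val a hn]
    have hsplit := pv_ends_split a hn
    have hoa := pv_countP_or_and (List.range a.length) (pvP a) (pvS a)
    omega
  · unfold solution solution_alt
    rw [if_pos (by simp [PySem.List.len_eq]; omega), if_pos (by simp [PySem.List.len_eq]; omega)]
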